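-- pv_equiv track=rewrite | github.com/spotlessswipe/static-site-generator | src/blocks.py | check_if_markdown_unordered_list
-- ===== SOURCE A (Python) =====
-- def check_if_markdown_unordered_list(markdown: str):
--     lines = markdown.split('\n')
--     for i, line in enumerate(lines):
--         if line[:2] != '- ':
--             return False
--         elif line[:2] == '- ' and i != len(lines)-1:
--             continue
--         elif line[:2] == '- ' and i == len(lines)-1:
--             return True
-- ===== SOURCE B (Python) =====
-- def check_if_markdown_unordered_list(markdown: str):
--     # Single left-to-right character scan over the raw string, no split:
--     # the string must start with '- ' and every '\n' must be followed by '- '.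
--     chars = list(markdown)
--     if chars[:2] != ['-', ' ']:
--         return False
--     i = 2
--     n = len(chars)
--     while i < n:
--         if chars[i] == '\n':
--             if chars[i + 1:i + 3] != ['-', ' ']:
--                 return False
--             i += 3
--         else:
--             i += 1
--     return True
-- ===== Notes on version B (the rewrite author's own statement) =====
-- stated objective: alternative
-- what changed: Replaces the split-into-lines plus enumerate loop (which builds a list of line strings and compares each line's 2-char slice and index against the last index) with a single character scan over the raw string that checks the string starts with '- ' and that every newline is immediately followed by '- ', building no intermediate line list.
import Mathlib
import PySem

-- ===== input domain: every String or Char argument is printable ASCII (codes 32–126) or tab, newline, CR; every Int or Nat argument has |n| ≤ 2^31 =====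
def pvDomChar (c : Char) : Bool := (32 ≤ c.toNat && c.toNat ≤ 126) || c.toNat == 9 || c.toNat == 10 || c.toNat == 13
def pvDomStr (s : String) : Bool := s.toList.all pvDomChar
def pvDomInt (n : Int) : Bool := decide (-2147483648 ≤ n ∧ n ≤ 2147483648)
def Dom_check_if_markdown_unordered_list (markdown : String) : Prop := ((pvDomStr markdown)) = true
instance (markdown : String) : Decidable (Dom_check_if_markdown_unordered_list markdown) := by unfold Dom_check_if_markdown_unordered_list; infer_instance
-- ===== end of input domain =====

-- B replaces A's split-into-lines + enumerate loop by a single character scan of the raw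
-- string ("starts with '- ' and every '\n' is followed by '- '"); equal return values.

-- ===== PORT A =====
-- the 'for i, line in enumerate(lines)' loop with its three branches (early returns / continue)
def pvALoop (n : Int) : List (Int × List Char) → Bool
  | [] => false  -- unreachable: lines from split is never empty, the last iteration always returns
  | (i, line) :: rest =>
      if PySem.List.slice line none (some 2) ≠ ['-', ' '] then false
      else if i ≠ n - 1 then pvALoop n rest
      else true

def check_if_markdown_unordered_list (markdown : String) : Bool :=
  let lines := PySem.Chars.splitOn markdown.toList ['\n']
  pvALoop (lines.length : Int) (PySem.List.enumerate lines 0)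

-- ===== PORT B =====
-- the while loop of Source B over the character list: on '\n' compare the next two chars
-- (chars[i+1:i+3], a nonnegative in-range slice = take/drop here) with '- ' and jump past them
def pvBScan : List Char → Bool
  | [] => true
  | c :: rest =>
      if c = '\n' then
        if rest.take 2 = ['-', ' '] then pvBScan (rest.drop 2) else false
      else pvBScan rest
termination_by cs => cs.length
decreasing_by
  all_goals simp

def check_if_markdown_unordered_list_alt (markdown : String) : Bool :=
  -- the chars[:2] != ['-', ' '] guard of Source B, then the scan from index 2
  if markdown.toList.take 2 ≠ ['-', ' '] then false
  else pvBScan (markdown.toList.drop 2)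

-- ===== PRECONDITION & SPEC =====
def Spec_check_if_markdown_unordered_list (markdown : String) (out : Bool) : Prop := out = check_if_markdown_unordered_list_alt markdown
instance (markdown : String) (out : Bool) : Decidable (Spec_check_if_markdown_unordered_list markdown out) := by unfold Spec_check_if_markdown_unordered_list; infer_instance

-- ===== CLAIM (what is proved, stated in full; the proofs are below) =====
def Claim_equal_check_if_markdown_unordered_list : Prop := ∀ (markdown : String), Dom_check_if_markdown_unordered_list markdown → Spec_check_if_markdown_unordered_list markdown (check_if_markdown_unordered_list markdown)

-- ===== LEMMAS AND PROOFS =====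

-- reference splitting function: Python's s.split('\n') as plain structural recursion
def pvSplit : List Char → List (List Char)
  | [] => [[]]
  | c :: rest =>
      if c = '\n' then [] :: pvSplit rest
      else
        match pvSplit rest with
        | h :: t => (c :: h) :: t
        | [] => [[c]]

theorem pvSplit_ne_nil (cs : List Char) : pvSplit cs ≠ [] := by
  cases cs with
  | nil => simp [pvSplit]
  | cons c rest =>
    simp only [pvSplit]
    split_ifs
    · simp
    · cases h : pvSplit rest <;> simp

theorem pvGo_eq (fuel : Nat) : ∀ (l cur : List Char) (acc : List (List Char)),
    l.length < fuel →
    PySem.Chars.splitOn.go ['\n'] fuel l cur acc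
      = acc.reverse ++ (pvSplit l).modifyHead (cur.reverse ++ ·) := by
  induction fuel with
  | zero => intro l cur acc h; omega
  | succ fuel ih =>
    intro l cur acc h
    cases l with
    | nil => simp [PySem.Chars.splitOn.go, pvSplit]
    | cons c rest =>
      by_cases hc : c = '\n'
      · subst hc
        rw [show PySem.Chars.splitOn.go ['\n'] (fuel+1) ('\n' :: rest) cur acc
              = PySem.Chars.splitOn.go ['\n'] fuel rest [] (cur.reverse :: acc) by
            simp [PySem.Chars.splitOn.go, List.isPrefixOf]]
        rw [ih rest [] (cur.reverse :: acc) (by simpa using h)]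
        simp only [pvSplit]
        cases pvSplit rest <;> simp
      · rw [show PySem.Chars.splitOn.go ['\n'] (fuel+1) (c :: rest) cur acc
              = PySem.Chars.splitOn.go ['\n'] fuel rest (c :: cur) acc by
            simp only [PySem.Chars.splitOn.go, List.isPrefixOf, Bool.and_true]
            rw [if_neg (by simp [Ne.symm hc])]]
        rw [ih rest (c :: cur) acc (by simpa using h)]
        simp only [pvSplit, if_neg hc]
        cases hs : pvSplit rest with
        | nil => exact absurd hs (pvSplit_ne_nil rest)
        | cons hd tl => simp

theorem pvSplitOn_eq (cs : List Char) :
    PySem.Chars.splitOn cs ['\n'] = pvSplit cs := by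
  rw [show PySem.Chars.splitOn cs ['\n']
        = PySem.Chars.splitOn.go ['\n'] (cs.length + 1) cs [] [] from rfl]
  rw [pvGo_eq (cs.length + 1) cs [] [] (by omega)]
  simp only [List.reverse_nil, List.nil_append]
  cases pvSplit cs <;> simp

-- one line "starts with '- '"
def pvOk (line : List Char) : Bool := line.take 2 = ['-', ' ']

theorem pvSlice_eq_ok (line : List Char) :
    (if PySem.List.slice line none (some 2) ≠ ['-', ' '] then false else true) = pvOk line := by
  rw [show (2 : Int) = ((2 : Nat) : Int) from rfl, PySem.List.slice_to_natCast]
  by_cases h : line.take 2 = ['-', ' '] <;> simp [pvOk, h]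

-- A's loop over the enumerated lines is 'all lines ok'
theorem pvALoop_eq : ∀ (lines : List (List Char)) (s : Int), lines ≠ [] →
    pvALoop (s + lines.length) (PySem.List.enumerate lines s) = lines.all pvOk := by
  intro lines
  induction lines with
  | nil => intro s h; exact absurd rfl h
  | cons l rest ih =>
    intro s _
    rw [PySem.List.enumerate_cons]
    have hsl := pvSlice_eq_ok l
    cases rest with
    | nil =>
      simp only [pvALoop, List.length_cons, List.length_nil]
      by_cases h : PySem.List.slice l none (some 2) = ['-', ' ']
      · have hok : pvOk l = true := by rw [← hsl, if_neg (by simp [h])]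
        simp [h, hok]
      · have hok : pvOk l = false := by rw [← hsl, if_pos (by simp [h])]
        simp [h, hok]
    | cons l2 t =>
      simp only [pvALoop]
      by_cases h : PySem.List.slice l none (some 2) = ['-', ' ']
      · have hok : pvOk l = true := by rw [← hsl, if_neg (by simp [h])]
        have hne : s ≠ s + (((l :: l2 :: t).length : Int)) - 1 := by
          simp only [List.length_cons]; push_cast; omega
        rw [if_neg (by simp [h]), if_pos hne]
        have hstep : s + ((l :: l2 :: t).length : Int) = (s + 1) + ((l2 :: t).length : Int) := by
          simp only [List.length_cons]; push_cast; ring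
        rw [hstep, ih (s + 1) (by simp)]
        simp [hok]
      · rw [if_pos (by simp [h])]
        have hok : pvOk l = false := by rw [← hsl, if_pos (by simp [h])]
        simp [hok]

-- a list whose first two elements are '-', ' ' is literally '-' :: ' ' :: rest
theorem pvTake_two_shape (xs : List Char) :
    xs.take 2 = ['-', ' '] ↔ ∃ r, xs = '-' :: ' ' :: r := by
  constructor
  · intro h
    match xs with
    | [] => simp at h
    | [a] => simp at h
    | a :: b :: r =>
      simp [List.take_succ_cons] at h
      exact ⟨r, by rw [h.1, h.2]⟩
  · rintro ⟨r, rfl⟩; rfl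

-- if the first line of the split starts with '- ', so does the string itself
theorem pvHead_ok_shape : ∀ (cs : List Char),
    pvOk (pvSplit cs).headI = true → ∃ r, cs = '-' :: ' ' :: r := by
  intro cs hok
  rcases cs with _ | ⟨c, _ | ⟨d, r⟩⟩
  · simp [pvSplit, pvOk] at hok
  · by_cases hc : c = '\n' <;> simp [pvSplit, hc, pvOk] at hok
  · by_cases hc : c = '\n'
    · simp [pvSplit, hc, pvOk] at hok
    · by_cases hd : d = '\n'
      · subst hd
        simp only [pvSplit, if_neg hc] at hok
        simp [pvOk] at hok
      · cases hs : pvSplit r with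
        | nil => exact absurd hs (pvSplit_ne_nil r)
        | cons h3 t3 =>
          simp only [pvSplit, if_neg hc, if_neg hd, hs] at hok
          simp only [List.headI, pvOk] at hok
          have : (c :: d :: h3).take 2 = ['-', ' '] := by simpa using hok
          simp [List.take_succ_cons] at this
          exact ⟨r, by rw [this.1, this.2]⟩

-- B's scan equals 'all non-first lines ok'
theorem pvBScan_eq : ∀ (n : Nat) (cs : List Char), cs.length ≤ n →
    pvBScan cs = (pvSplit cs).tail.all pvOk := by
  intro n
  induction n with
  | zero =>
    intro cs h
    have : cs = [] := by cases cs <;> simp_all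
    subst this; simp [pvBScan, pvSplit]
  | succ n ih =>
    intro cs h
    cases cs with
    | nil => simp [pvBScan, pvSplit]
    | cons c rest =>
      by_cases hc : c = '\n'
      · subst hc
        rw [pvBScan.eq_def]; simp only [if_true]
        simp only [pvSplit, if_true, List.tail_cons]
        by_cases ht : rest.take 2 = ['-', ' ']
        · obtain ⟨r, rfl⟩ := (pvTake_two_shape rest).mp ht
          rw [if_pos ht]
          have hd2 : ('-' :: ' ' :: r).drop 2 = r := rfl
          rw [hd2, ih r (by simp at h; omega)]
          simp only [pvSplit, if_neg (by decide : ¬ ('-' : Char) = '\n'),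
            if_neg (by decide : ¬ (' ' : Char) = '\n')]
          cases hs : pvSplit r with
          | nil => exact absurd hs (pvSplit_ne_nil r)
          | cons h2 t2 => simp [pvOk]
        · rw [if_neg ht]
          cases hs : pvSplit rest with
          | nil => exact absurd hs (pvSplit_ne_nil rest)
          | cons h2 t2 =>
            have hnok : pvOk h2 = false := by
              by_contra hb
              have hok : pvOk (pvSplit rest).headI = true := by
                rw [hs]; simpa using Bool.of_not_eq_false hb
              obtain ⟨r, hr⟩ := pvHead_ok_shape rest hok
              exact ht ((pvTake_two_shape rest).mpr ⟨r, hr⟩)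
            simp [hnok]
      · rw [pvBScan.eq_def]; simp only []; rw [if_neg hc]
        rw [ih rest (by simp at h; omega)]
        simp only [pvSplit, if_neg hc]
        cases hs : pvSplit rest with
        | nil => exact absurd hs (pvSplit_ne_nil rest)
        | cons h2 t2 => simp

-- B computes 'all lines ok'
theorem pvAlt_eq (markdown : String) :
    check_if_markdown_unordered_list_alt markdown = (pvSplit markdown.toList).all pvOk := by
  unfold check_if_markdown_unordered_list_alt
  by_cases ht : markdown.toList.take 2 = ['-', ' ']
  · rw [if_neg (by simp [ht])]
    obtain ⟨r, hr⟩ := (pvTake_two_shape markdown.toList).mp ht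
    rw [hr]
    have hd2 : ('-' :: ' ' :: r).drop 2 = r := rfl
    rw [hd2, pvBScan_eq r.length r le_rfl]
    simp only [pvSplit, if_neg (by decide : ¬ ('-' : Char) = '\n'),
      if_neg (by decide : ¬ (' ' : Char) = '\n')]
    cases hs : pvSplit r with
    | nil => exact absurd hs (pvSplit_ne_nil r)
    | cons h2 t2 => simp [pvOk]
  · rw [if_pos (by simp [ht])]
    cases hs : pvSplit markdown.toList with
    | nil => exact absurd hs (pvSplit_ne_nil markdown.toList)
    | cons h2 t2 =>
      have hnok : pvOk h2 = false := by
        by_contra hb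
        have hok : pvOk (pvSplit markdown.toList).headI = true := by
          rw [hs]; simpa using Bool.of_not_eq_false hb
        obtain ⟨r, hr⟩ := pvHead_ok_shape markdown.toList hok
        exact ht ((pvTake_two_shape markdown.toList).mpr ⟨r, hr⟩)
      simp [hnok]

-- ===== VERDICT (by name: the statement is the Claim_ definition above) =====
theorem check_if_markdown_unordered_list_spec : Claim_equal_check_if_markdown_unordered_list := by
  intro markdown _
  unfold Spec_check_if_markdown_unordered_list
  rw [pvAlt_eq]
  show pvALoop (((PySem.Chars.splitOn markdown.toList ['\n']).length : Int))
      (PySem.List.enumerate (PySem.Chars.splitOn markdown.toList ['\n']) 0)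
    = (pvSplit markdown.toList).all pvOk
  rw [pvSplitOn_eq]
  have hne := pvSplit_ne_nil markdown.toList
  have h0 : ((pvSplit markdown.toList).length : Int)
      = 0 + ((pvSplit markdown.toList).length : Int) := by ring
  rw [h0, pvALoop_eq (pvSplit markdown.toList) 0 hne]
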